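-- pv_equiv track=rewrite | github.com/jackemcpherson/FreeCodeCamp-JavascriptAndPython | Intermediate Algorithm Scripting/Python/fearNotLetter.py | fearNotLetter
-- ===== SOURCE A (Python) =====
-- def fearNotLetter(string: str):
--     alphabet = "abcdefghijklmnopqrstuvwxyz"
--     alphaStr = alphabet[alphabet.index(string[0]) : alphabet.index(string[-1])]
--     for x in alphaStr:
--         if x not in string:
--             return x
--         else:
--             pass
-- ===== SOURCE B (Python) =====
-- def fearNotLetter(string: str):
--     expect, hi = ord(string[0]), ord(string[-1])
--     for p in sorted(set(string)):
--         if ord(p) == expect: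
--             expect += 1
--     return chr(expect) if expect < hi else None
-- ===== Notes on version B (the rewrite author's own statement) =====
-- stated objective: alternative
-- what changed: A walks the alphabet slice from string[0] to string[-1] testing each candidate for membership in the string; B never enumerates candidates: it sorts the distinct characters of the string once and sweeps an expected-code counter past each matching code (a gap scan), returning chr(expect) if the counter stops before the last character's code, else None.
import Mathlib
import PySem

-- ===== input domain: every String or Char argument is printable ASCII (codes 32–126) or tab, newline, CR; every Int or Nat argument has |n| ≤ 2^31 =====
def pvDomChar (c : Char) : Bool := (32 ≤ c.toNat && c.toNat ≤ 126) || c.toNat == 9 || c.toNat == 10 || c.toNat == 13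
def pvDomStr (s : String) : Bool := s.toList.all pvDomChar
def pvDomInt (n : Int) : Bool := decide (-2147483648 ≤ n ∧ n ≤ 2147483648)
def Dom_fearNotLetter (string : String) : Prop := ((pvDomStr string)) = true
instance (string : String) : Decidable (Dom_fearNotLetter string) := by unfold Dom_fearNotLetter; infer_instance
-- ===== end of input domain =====

-- B replaces A's scan of the alphabet slice (substring membership test per candidate) by a
-- gap scan: sort the distinct characters of the string once and advance an expected-code
-- counter past each match; return values agree on Pre_ (nonempty string with lowercase ends).

-- ===== PORT A =====
def pvAlphabet : List Char := "abcdefghijklmnopqrstuvwxyz".toList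

-- the 'for x in alphaStr: if x not in string: return x' loop
def pvLoopA (cs : List Char) : List Char → Option String
  | [] => none
  | x :: rest => if PySem.Chars.isIn [x] cs then pvLoopA cs rest else some (String.ofList [x])

def fearNotLetter (string : String) : Option String :=
  let cs := string.toList
  match PySem.List.pyGet? cs 0, PySem.List.pyGet? cs (-1) with
  | some c0, some c1 =>
    match PySem.List.index? pvAlphabet c0, PySem.List.index? pvAlphabet c1 with
    | some i0, some i1 => pvLoopA cs (PySem.List.slice pvAlphabet (some (i0 : Int)) (some (i1 : Int)))
    | _, _ => none   -- ValueError (first or last character not a lowercase letter): outside Pre_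
  | _, _ => none     -- IndexError (empty string): outside Pre_

-- ===== PORT B =====
def fearNotLetter_alt (string : String) : Option String :=
  let cs := string.toList
  match PySem.List.pyGet? cs 0 with
  | none => none     -- IndexError (empty string): outside Pre_
  | some c0 =>
  match PySem.List.pyGet? cs (-1) with
  | none => none
  | some c1 =>
    let hi : Int := c1.toNat
    -- 'for p in sorted(set(string)): if ord(p) == expect: expect += 1'
    let expect := (PySem.List.sorted (PySem.Set.ofList cs) (fun x => x) false).foldl
      (fun e p => if (p.toNat : Int) = e then e + 1 else e) (c0.toNat : Int)
    if expect < hi then some (String.ofList [Char.ofNat expect.toNat]) else none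

-- ===== PRECONDITION & SPEC =====
-- Pre_ excludes exactly the inputs on which A raises: the empty string (IndexError on string[0])
-- and strings whose first or last character is not a lowercase ASCII letter (ValueError from alphabet.index).
def Pre_fearNotLetter (string : String) : Prop :=
  string.toList ≠ [] ∧
  ('a' ≤ string.toList.headD 'a' ∧ string.toList.headD 'a' ≤ 'z') ∧
  ('a' ≤ string.toList.getLastD 'a' ∧ string.toList.getLastD 'a' ≤ 'z')
instance (string : String) : Decidable (Pre_fearNotLetter string) := by unfold Pre_fearNotLetter; infer_instance

def pvWitness_fearNotLetter : String := "abce"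

def Spec_fearNotLetter (string : String) (out : Option String) : Prop := out = fearNotLetter_alt string
instance (string : String) (out : Option String) : Decidable (Spec_fearNotLetter string out) := by unfold Spec_fearNotLetter; infer_instance

-- ===== CLAIM (what is proved, stated in full; the proofs are below) =====
def Claim_equal_fearNotLetter : Prop := ∀ (string : String), Dom_fearNotLetter string → Pre_fearNotLetter string → Spec_fearNotLetter string (fearNotLetter string)

-- ===== LEMMAS AND PROOFS =====

-- index of a lowercase letter in the alphabet is its distance from 'a'
set_option maxRecDepth 8000 in
theorem pv_index_lower (c : Char) (h1 : 'a' ≤ c) (h2 : c ≤ 'z') :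
    PySem.List.index? pvAlphabet c = some (c.toNat - 97) := by
  have hb1 : 97 ≤ c.toNat := Nat.succ_le_of_lt h1
  have hb2 : c.toNat ≤ 122 := Fin.mk_le_mk.mp h2
  have hc : c = Char.ofNat c.toNat := (Char.ofNat_toNat c).symm
  set n := c.toNat with hn
  rw [hc]
  interval_cases n <;> decide

-- the alphabet slice is exactly the chr-image of the code range
theorem pv_slice_eq_range (a b : Nat) (ha1 : 97 ≤ a) (ha2 : a ≤ 122) (hb1 : 97 ≤ b) (hb2 : b ≤ 122) :
    PySem.List.slice pvAlphabet (some ((a - 97 : Nat) : Int)) (some ((b - 97 : Nat) : Int)) =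
      (PySem.List.pyRange (a : Int) (b : Int) 1).map (fun n => Char.ofNat n.toNat) := by
  have key : ∀ x ∈ List.range 26, ∀ y ∈ List.range 26,
      PySem.List.slice pvAlphabet (some (x : Int)) (some (y : Int)) =
      (PySem.List.pyRange ((97 + x : Nat) : Int) ((97 + y : Nat) : Int) 1).map (fun n => Char.ofNat n.toNat) := by
    decide
  have h := key (a - 97) (List.mem_range.2 (by omega)) (b - 97) (List.mem_range.2 (by omega))
  have e1 : 97 + (a - 97) = a := by omega
  have e2 : 97 + (b - 97) = b := by omega
  rwa [e1, e2] at h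

theorem pv_isIn_singleton (x : Char) (cs : List Char) : PySem.Chars.isIn [x] cs = cs.contains x := by
  rw [Bool.eq_iff_iff, PySem.Chars.isIn_iff_infix, List.singleton_infix_iff, List.contains_iff_mem]

-- A's loop skips a prefix of candidates all present in the string
theorem pv_loopA_append (cs L1 L2 : List Char) (h : ∀ x ∈ L1, x ∈ cs) :
    pvLoopA cs (L1 ++ L2) = pvLoopA cs L2 := by
  induction L1 with
  | nil => rfl
  | cons x rest ih =>
    rw [List.cons_append, pvLoopA, pv_isIn_singleton,
      if_pos (List.contains_iff_mem.2 (h x List.mem_cons_self))]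
    exact ih (fun y hy => h y (List.mem_cons_of_mem x hy))

theorem pv_loopA_all_present (cs L : List Char) (h : ∀ x ∈ L, x ∈ cs) :
    pvLoopA cs L = none := by
  have := pv_loopA_append cs L [] h
  rwa [List.append_nil] at this

-- characterisation of B's expected-code fold over a strictly increasing list
theorem pv_fold_spec (L : List Char) (hL : L.Pairwise (· < ·)) (e : Int) :
    e ≤ L.foldl (fun e p => if (p.toNat : Int) = e then e + 1 else e) e ∧
    (∀ k : Int, e ≤ k → k < L.foldl (fun e p => if (p.toNat : Int) = e then e + 1 else e) e →
      ∃ p ∈ L, (p.toNat : Int) = k) ∧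
    (∀ p ∈ L, (p.toNat : Int) ≠ L.foldl (fun e p => if (p.toNat : Int) = e then e + 1 else e) e) := by
  induction L generalizing e with
  | nil => exact ⟨le_refl _, fun k h1 h2 => absurd h1 (not_le.2 h2), fun p hp => absurd hp (List.not_mem_nil)⟩
  | cons p rest ih =>
    have hrest : rest.Pairwise (· < ·) := (List.pairwise_cons.1 hL).2
    have hgt : ∀ q ∈ rest, p < q := (List.pairwise_cons.1 hL).1
    by_cases hpe : (p.toNat : Int) = e
    · simp only [List.foldl_cons, if_pos hpe]
      obtain ⟨h1, h2, h3⟩ := ih hrest (e + 1)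
      refine ⟨by omega, ?_, ?_⟩
      · intro k hk1 hk2
        by_cases hke : k = e
        · exact ⟨p, List.mem_cons_self, by omega⟩
        · obtain ⟨q, hq, hqe⟩ := h2 k (by omega) hk2
          exact ⟨q, List.mem_cons_of_mem p hq, hqe⟩
      · intro q hq
        rcases List.mem_cons.1 hq with rfl | hq'
        · omega
        · exact h3 q hq'
    · simp only [List.foldl_cons, if_neg hpe]
      obtain ⟨h1, h2, h3⟩ := ih hrest e
      by_cases hlt : (p.toNat : Int) < e
      · refine ⟨h1, ?_, ?_⟩
        · intro k hk1 hk2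
          obtain ⟨q, hq, hqe⟩ := h2 k hk1 hk2
          exact ⟨q, List.mem_cons_of_mem p hq, hqe⟩
        · intro q hq
          rcases List.mem_cons.1 hq with rfl | hq'
          · omega
          · exact h3 q hq'
      · -- p's code is above e: everything later is larger still, the fold stays at e
        have hr : rest.foldl (fun e p => if (p.toNat : Int) = e then e + 1 else e) e = e := by
          by_contra hne
          obtain ⟨q, hq, hqe⟩ := h2 e (le_refl e) (lt_of_le_of_ne h1 (Ne.symm hne))
          have := hgt q hq
          have : p.toNat < q.toNat := Nat.succ_le_of_lt this
          omega
        rw [hr]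
        refine ⟨le_refl _, fun k hk1 hk2 => absurd hk1 (not_le.2 hk2), ?_⟩
        intro q hq
        rcases List.mem_cons.1 hq with rfl | hq'
        · omega
        · have := hgt q hq'
          have : p.toNat < q.toNat := Nat.succ_le_of_lt this
          omega

theorem pv_main (string : String) (_hdom : Dom_fearNotLetter string)
    (hpre : Pre_fearNotLetter string) : fearNotLetter string = fearNotLetter_alt string := by
  obtain ⟨hne, ⟨h0a, h0z⟩, ⟨h1a, h1z⟩⟩ := hpre
  obtain ⟨c0, t, hct⟩ : ∃ c0 t, string.toList = c0 :: t := by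
    cases h : string.toList with
    | nil => exact absurd h hne
    | cons a b => exact ⟨a, b, rfl⟩
  have hg0 : PySem.List.pyGet? string.toList 0 = some c0 := by
    rw [hct]; exact PySem.List.pyGet?_zero_cons c0 t
  have hc1 : string.toList.getLastD 'a' = string.toList.getLast hne := by
    rw [List.getLastD_eq_getLast?, List.getLast?_eq_some_getLast hne]; rfl
  set c1 := string.toList.getLast hne with hc1d
  have hg1 : PySem.List.pyGet? string.toList (-1) = some c1 := by
    rw [PySem.List.pyGet?_neg_one, List.getLast?_eq_some_getLast hne]
  have hh : string.toList.headD 'a' = c0 := by rw [hct]; rfl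
  rw [hh] at h0a h0z
  rw [hc1] at h1a h1z
  have hn0a : 97 ≤ c0.toNat := Nat.succ_le_of_lt h0a
  have hn0z : c0.toNat ≤ 122 := Fin.mk_le_mk.mp h0z
  have hn1a : 97 ≤ c1.toNat := Nat.succ_le_of_lt h1a
  have hn1z : c1.toNat ≤ 122 := Fin.mk_le_mk.mp h1z
  have hi0 : PySem.List.index? pvAlphabet c0 = some (c0.toNat - 97) := pv_index_lower c0 h0a h0z
  have hi1 : PySem.List.index? pvAlphabet c1 = some (c1.toNat - 97) := pv_index_lower c1 h1a h1z
  have hslice := pv_slice_eq_range c0.toNat c1.toNat hn0a hn0z hn1a hn1z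
  -- B's sorted distinct-character list
  set L := PySem.List.sorted (PySem.Set.ofList string.toList) (fun x => x) false with hLdef
  have hLpair : L.Pairwise (· < ·) := PySem.List.sorted_ofList_pairwise_lt ..
  have hLmem : ∀ p : Char, p ∈ L ↔ p ∈ string.toList := fun p => by
    rw [hLdef, PySem.List.mem_sorted, PySem.Set.mem_ofList]
  set step := fun (e : Int) (p : Char) => if (p.toNat : Int) = e then e + 1 else e with hstep
  set r := L.foldl step (c0.toNat : Int) with hrdef
  obtain ⟨hr1, hr2, hr3⟩ := pv_fold_spec L hLpair (c0.toNat : Int)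
  rw [← hrdef] at hr1 hr2 hr3
  -- evaluate both ports
  rw [fearNotLetter, fearNotLetter_alt]
  simp only [hg0, hg1, hi0, hi1, ← hstep]
  rw [hslice]
  -- present codes give present characters
  have hpresent : ∀ k : Int, (c0.toNat : Int) ≤ k → k < r →
      (Char.ofNat k.toNat) ∈ string.toList := by
    intro k hk1 hk2
    obtain ⟨p, hpL, hpe⟩ := hr2 k hk1 hk2
    have : p.toNat = k.toNat := by omega
    rw [← this, Char.ofNat_toNat]
    exact (hLmem p).1 hpL
  by_cases hlt : r < (c1.toNat : Int)
  · -- split the candidate range at r: prefix all present, char r absent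
    rw [if_pos hlt,
      PySem.List.pyRange_one_append (c0.toNat : Int) r (c1.toNat : Int) hr1 (le_of_lt hlt),
      List.map_append,
      pv_loopA_append _ _ _ (by
        intro x hx
        obtain ⟨k, hk, rfl⟩ := List.mem_map.1 hx
        rw [PySem.List.mem_pyRange_one] at hk
        exact hpresent k hk.1 hk.2),
      PySem.List.pyRange_one_cons hlt, List.map_cons, pvLoopA, pv_isIn_singleton]
    rw [if_neg]
    intro hmem
    rw [List.contains_iff_mem] at hmem
    -- the character with code r is in the string, contradicting hr3
    have hrL : Char.ofNat r.toNat ∈ L := (hLmem _).2 hmem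
    have hval : (Char.ofNat r.toNat).toNat = r.toNat := by
      have hb : r.toNat ≤ 122 := by omega
      interval_cases h : r.toNat <;> decide
    have := hr3 _ hrL
    rw [hval] at this
    omega
  · -- no gap below c1: every candidate is present, both sides return none
    rw [if_neg hlt]
    apply pv_loopA_all_present
    intro x hx
    obtain ⟨k, hk, rfl⟩ := List.mem_map.1 hx
    rw [PySem.List.mem_pyRange_one] at hk
    exact hpresent k hk.1 (by omega)

-- ===== VERDICT (by name: the statement is the Claim_ definition above) =====
theorem fearNotLetter_spec : Claim_equal_fearNotLetter := by
  intro s hdom hpre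
  exact pv_main s hdom hpre
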